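-- pv_equiv track=rewrite | github.com/Dankerbadge/betting-bot | betbot/kalshi_nonsports_persistence.py | _tail_streak
-- ===== SOURCE A (Python) =====
-- def _tail_streak(snapshot_keys: list[str], active_keys: set[str]) -> int:
--     streak = 0
--     for snapshot_key in reversed(snapshot_keys):
--         if snapshot_key in active_keys:
--             streak += 1
--         else:
--             break
--     return streak
-- ===== SOURCE B (Python) =====
-- def _tail_streak(snapshot_keys: list[str], active_keys: set[str]) -> int:
--     streak = 0
--     for snapshot_key in snapshot_keys:
--         if snapshot_key in active_keys:
--             streak += 1
--         else:
--             streak = 0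
--     return streak
-- ===== Notes on version B (the rewrite author's own statement) =====
-- stated objective: simpler
-- what changed: B scans snapshot_keys forward with a single reset-on-miss counter instead of iterating the reversed list with a break; the final counter equals the length of the trailing run of active members.
import Mathlib
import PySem

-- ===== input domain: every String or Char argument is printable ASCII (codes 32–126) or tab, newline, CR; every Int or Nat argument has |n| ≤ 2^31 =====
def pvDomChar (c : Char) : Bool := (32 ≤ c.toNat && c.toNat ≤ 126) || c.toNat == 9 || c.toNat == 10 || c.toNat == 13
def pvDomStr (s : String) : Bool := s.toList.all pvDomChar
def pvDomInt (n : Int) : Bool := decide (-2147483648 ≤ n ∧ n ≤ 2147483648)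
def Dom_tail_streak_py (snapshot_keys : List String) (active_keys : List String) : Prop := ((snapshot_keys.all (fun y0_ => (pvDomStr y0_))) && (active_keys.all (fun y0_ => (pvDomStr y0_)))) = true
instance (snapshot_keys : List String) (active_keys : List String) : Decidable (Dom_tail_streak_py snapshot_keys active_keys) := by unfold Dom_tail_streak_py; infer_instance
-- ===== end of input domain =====

-- B scans forward with a reset-on-miss counter instead of reversed iteration with break (objective: simpler).
-- ===== PORT A =====
-- loop 'for snapshot_key in reversed(snapshot_keys): if … streak += 1 else break' as structural recursion on the reversed list
def tailStreakRev (keys : List String) (active_keys : List String) (streak : Int) : Int :=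
  match keys with
  | [] => streak
  | k :: rest => if active_keys.contains k then tailStreakRev rest active_keys (streak + 1) else streak

def tail_streak_py (snapshot_keys : List String) (active_keys : List String) : Int :=
  tailStreakRev snapshot_keys.reverse active_keys 0

-- ===== PORT B =====
def tail_streak_py_alt (snapshot_keys : List String) (active_keys : List String) : Int :=
  snapshot_keys.foldl (fun streak k => if active_keys.contains k then streak + 1 else 0) 0

-- ===== PRECONDITION & SPEC =====
def Spec_tail_streak_py (snapshot_keys : List String) (active_keys : List String) (out : Int) : Prop := out = tail_streak_py_alt snapshot_keys active_keys
instance (snapshot_keys : List String) (active_keys : List String) (out : Int) : Decidable (Spec_tail_streak_py snapshot_keys active_keys out) := by unfold Spec_tail_streak_py; infer_instance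

-- ===== CLAIM (what is proved, stated in full; the proofs are below) =====
def Claim_equal_tail_streak_py : Prop := ∀ (snapshot_keys : List String) (active_keys : List String), Dom_tail_streak_py snapshot_keys active_keys → Spec_tail_streak_py snapshot_keys active_keys (tail_streak_py snapshot_keys active_keys)

-- ===== LEMMAS AND PROOFS =====

-- ===== VERDICT (by name: the statement is the Claim_ definition above) =====
-- A's recursion, with the +1s pulled out of the accumulator
lemma tailStreakRev_acc (keys active : List String) (s : Int) :
    tailStreakRev keys active s = s + tailStreakRev keys active 0 := by
  induction keys generalizing s with
  | nil => simp [tailStreakRev]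
  | cons k rest ih =>
    simp only [tailStreakRev]
    split
    · rw [ih (s + 1), ih (0 + 1)]; ring
    · simp

-- B's fold equals A's recursion on the reverse
lemma foldl_eq_rev (xs active : List String) :
    xs.foldl (fun streak k => if active.contains k then streak + 1 else 0) 0
      = tailStreakRev xs.reverse active 0 := by
  induction xs using List.reverseRecOn with
  | nil => simp [tailStreakRev]
  | append_singleton xs x ih =>
    rw [List.foldl_append, List.reverse_append]
    simp only [List.foldl, List.reverse_singleton, List.singleton_append, tailStreakRev]
    split
    · rw [ih, tailStreakRev_acc _ _ (0 + 1)]; ring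
    · rfl

theorem tail_streak_py_spec : Claim_equal_tail_streak_py := by
  intro xs active _
  unfold Spec_tail_streak_py tail_streak_py tail_streak_py_alt
  exact (foldl_eq_rev xs active).symm
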